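-- pv_equiv track=rewrite | github.com/quanyuanshang/data-visualization | Topic1/analyze_cluster_genres.py | get_cluster_info
-- ===== SOURCE A (Python) =====
-- def get_cluster_info(labels):
--     """获取所有聚类的信息"""
--     unique_labels = sorted(set(labels))
--     cluster_info = []
--
--     for label in unique_labels:
--         if label == -1:
--             continue
--         count = list(labels).count(label)
--         cluster_info.append({
--             'cluster_id': label,
--             'size': count
--         })
--
--     cluster_info.sort(key=lambda x: x['size'], reverse=True)
--     return cluster_info
-- ===== SOURCE B (Python) =====
-- def get_cluster_info(labels):
--     """获取所有聚类的信息"""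
--     s = sorted(labels)
--     cluster_info = []
--     i, n = 0, len(s)
--     while i < n:
--         j = i
--         while j < n and s[j] == s[i]:
--             j += 1
--         if s[i] != -1:
--             cluster_info.append({'cluster_id': s[i], 'size': j - i})
--         i = j
--     cluster_info.sort(key=lambda x: x['size'], reverse=True)
--     return cluster_info
-- ===== Notes on version B (the rewrite author's own statement) =====
-- stated objective: faster
-- what changed: Replaces A's sorted(set(labels)) plus a full labels.count scan per distinct label with one sort of labels followed by a single run-length pass over the sorted list; the final stable size-descending sort is kept.
import Mathlib
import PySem

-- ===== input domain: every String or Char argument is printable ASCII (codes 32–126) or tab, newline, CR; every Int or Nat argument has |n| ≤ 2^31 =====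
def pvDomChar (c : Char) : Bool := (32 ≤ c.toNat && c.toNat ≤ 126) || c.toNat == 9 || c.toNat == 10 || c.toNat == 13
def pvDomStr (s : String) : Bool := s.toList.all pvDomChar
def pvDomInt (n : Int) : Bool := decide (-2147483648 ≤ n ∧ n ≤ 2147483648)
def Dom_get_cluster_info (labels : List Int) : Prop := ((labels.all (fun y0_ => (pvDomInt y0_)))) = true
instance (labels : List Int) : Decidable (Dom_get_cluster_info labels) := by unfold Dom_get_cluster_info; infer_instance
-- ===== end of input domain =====

-- B replaces A's per-label `labels.count(label)` rescans over the whole list by one sort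
-- followed by a single run-length pass over the sorted list (objective: faster).

-- shared sort key: both Pythons end with cluster_info.sort(key=lambda x: x['size'], reverse=True)
def pvSizeKey (x : List (String × Int)) : Int := PySem.Dict.getD ⟨x⟩ "size" 0

-- ===== PORT A =====
def get_cluster_info (labels : List Int) : List (List (String × Int)) :=
  let unique_labels := PySem.List.sorted (PySem.Set.ofList labels) (fun x => x) false
  let cluster_info := unique_labels.foldl (fun acc label =>
    if label == -1 then acc
    else acc ++ [[("cluster_id", label), ("size", (PySem.List.count labels label : Int))]]) []
  PySem.List.sorted cluster_info pvSizeKey true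

-- ===== PORT B =====
-- the outer while loop of B: consume one maximal run of equal values per step
def pvRuns : List Int → List (List (String × Int))
  | [] => []
  | x :: xs =>
    if x == -1 then pvRuns (xs.dropWhile (· == x))
    else [("cluster_id", x), ("size", 1 + ((xs.takeWhile (· == x)).length : Int))]
           :: pvRuns (xs.dropWhile (· == x))
termination_by s => s.length
decreasing_by all_goals (have := List.length_dropWhile_le (· == x) xs; simp; omega)

def get_cluster_info_alt (labels : List Int) : List (List (String × Int)) :=
  PySem.List.sorted (pvRuns (PySem.List.sorted labels (fun x => x) false)) pvSizeKey true

-- ===== PRECONDITION & SPEC =====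
def Spec_get_cluster_info (labels : List Int) (out : List (List (String × Int))) : Prop := out = get_cluster_info_alt labels
instance (labels : List Int) (out : List (List (String × Int))) : Decidable (Spec_get_cluster_info labels out) := by unfold Spec_get_cluster_info; infer_instance

-- ===== CLAIM (what is proved, stated in full; the proofs are below) =====
def Claim_equal_get_cluster_info : Prop := ∀ (labels : List Int), Dom_get_cluster_info labels → Spec_get_cluster_info labels (get_cluster_info labels)

-- ===== LEMMAS AND PROOFS =====

-- from a sorted list, everything after the leading run of x is strictly greater than x
theorem pv_lt_of_mem_dropWhile (x : Int) (xs : List Int)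
    (h : (x :: xs).Pairwise (· ≤ ·)) :
    ∀ y ∈ xs.dropWhile (· == x), x < y := by
  induction xs with
  | nil => simp
  | cons a t ih =>
    rw [List.dropWhile_cons]
    by_cases hax : a = x
    · subst hax
      simp only [BEq.rfl, if_true]
      apply ih
      exact (List.pairwise_cons.mpr ⟨fun y hy => (List.pairwise_cons.mp h).1 y (by simp [hy]),
        ((List.pairwise_cons.mp h).2).of_cons⟩)
    · have hb : (a == x) = false := by simp [hax]
      simp only [hb]
      intro y hy
      have hxa : x ≤ a := (List.pairwise_cons.mp h).1 a (by simp)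
      have hxa' : x < a := lt_of_le_of_ne hxa (fun he => hax he.symm)
      rcases List.mem_cons.mp hy with rfl | hyt
      · exact hxa'
      · exact lt_of_lt_of_le hxa'
          ((List.pairwise_cons.mp ((List.pairwise_cons.mp h).2)).1 y hyt)

-- the distinct labels of a sorted list, in order (first element of each run)
def pvKeys : List Int → List Int
  | [] => []
  | x :: xs => x :: pvKeys (xs.dropWhile (· == x))
termination_by s => s.length
decreasing_by have := List.length_dropWhile_le (· == x) xs; simp; omega

theorem pvKeys_subset : ∀ (s : List Int), ∀ y ∈ pvKeys s, y ∈ s := by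
  intro s
  induction s using pvKeys.induct with
  | case1 => simp [pvKeys]
  | case2 x xs ih =>
    intro y hy
    rw [pvKeys] at hy
    rcases List.mem_cons.mp hy with rfl | h
    · simp
    · exact List.mem_cons_of_mem _ ((List.dropWhile_sublist _).subset (ih y h))

theorem pvKeys_mem (s : List Int) (hs : s.Pairwise (· ≤ ·)) (k : Int) :
    k ∈ pvKeys s ↔ k ∈ s := by
  induction s using pvKeys.induct with
  | case1 => simp [pvKeys]
  | case2 x xs ih =>
    constructor
    · exact pvKeys_subset _ k
    · intro hk
      rw [pvKeys]
      rcases List.mem_cons.mp hk with rfl | hk'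
      · simp
      · rw [← List.takeWhile_append_dropWhile (p := (· == x)) (l := xs)] at hk'
        rcases List.mem_append.mp hk' with htw | hdw
        · have : k = x := by simpa using List.mem_takeWhile_imp htw
          simp [this]
        · have hrs : (xs.dropWhile (· == x)).Pairwise (· ≤ ·) :=
            hs.of_cons.sublist (List.dropWhile_sublist _)
          exact List.mem_cons_of_mem _ ((ih hrs).mpr hdw)

theorem pvKeys_pairwise (s : List Int) (hs : s.Pairwise (· ≤ ·)) :
    (pvKeys s).Pairwise (· < ·) := by
  induction s using pvKeys.induct with
  | case1 => simp [pvKeys]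
  | case2 x xs ih =>
    have hrs : (xs.dropWhile (· == x)).Pairwise (· ≤ ·) :=
      hs.of_cons.sublist (List.dropWhile_sublist _)
    rw [pvKeys]
    refine List.pairwise_cons.mpr ⟨fun y hy => ?_, ih hrs⟩
    exact pv_lt_of_mem_dropWhile x xs hs y (pvKeys_subset _ y hy)

theorem pvRuns_eq (s : List Int) (hs : s.Pairwise (· ≤ ·)) :
    pvRuns s = ((pvKeys s).filter (fun k => !(k == -1))).map
      (fun k => [("cluster_id", k), ("size", (List.count k s : Int))]) := by
  induction s using pvKeys.induct with
  | case1 => simp [pvRuns, pvKeys]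
  | case2 x xs ih =>
    have hlt : ∀ y ∈ xs.dropWhile (· == x), x < y := pv_lt_of_mem_dropWhile x xs hs
    have hxrest : x ∉ xs.dropWhile (· == x) := fun h => lt_irrefl x (hlt x h)
    have hrs : (xs.dropWhile (· == x)).Pairwise (· ≤ ·) :=
      hs.of_cons.sublist (List.dropWhile_sublist _)
    have hcount_sub : ∀ k ∈ xs.dropWhile (· == x),
        List.count k (x :: xs) = List.count k (xs.dropWhile (· == x)) := by
      intro k hk
      have hkx : x ≠ k := ne_of_lt (hlt k hk)
      have hktw : List.count k (xs.takeWhile (· == x)) = 0 := by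
        rw [List.count_eq_zero]
        intro hmem
        have hkx' : k = x := by simpa using List.mem_takeWhile_imp hmem
        exact hkx hkx'.symm
      rw [List.count_cons, ← List.takeWhile_append_dropWhile (p := (· == x)) (l := xs),
        List.count_append, hktw]
      simp [hkx]
    have htail : ((pvKeys (xs.dropWhile (· == x))).filter (fun k => !(k == -1))).map
          (fun k => [("cluster_id", k), ("size", (List.count k (xs.dropWhile (· == x)) : Int))])
        = ((pvKeys (xs.dropWhile (· == x))).filter (fun k => !(k == -1))).map
          (fun k => [("cluster_id", k), ("size", (List.count k (x :: xs) : Int))]) := by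
      apply List.map_congr_left
      intro k hk
      have hk' : k ∈ pvKeys (xs.dropWhile (· == x)) := List.mem_of_mem_filter hk
      rw [hcount_sub k (pvKeys_subset _ k hk')]
    rw [pvRuns, pvKeys, List.filter_cons]
    by_cases hx : (x == (-1 : Int)) = true
    · simp only [hx, Bool.not_true, if_true, Bool.false_eq_true, if_false]
      rw [ih hrs, htail]
    · rw [Bool.not_eq_true] at hx
      have hb : (x == (-1 : Int)) = false := hx
      have hcx : List.count x (x :: xs) = (xs.takeWhile (· == x)).length + 1 := by
        have htw : List.count x (xs.takeWhile (· == x)) = (xs.takeWhile (· == x)).length := by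
          rw [List.count_eq_length]
          intro b hb'
          have hb'' : b = x := by simpa using List.mem_takeWhile_imp hb'
          exact hb''.symm
        have hdw : List.count x (xs.dropWhile (· == x)) = 0 :=
          List.count_eq_zero.mpr hxrest
        rw [List.count_cons, ← List.takeWhile_append_dropWhile (p := (· == x)) (l := xs),
          List.count_append, htw, hdw]
        simp
      simp only [hb, Bool.not_false, if_true, Bool.false_eq_true, if_false, List.map_cons]
      rw [ih hrs, htail, hcx]
      congr 2
      push_cast
      ring_nf

-- ===== VERDICT (by name: the statement is the Claim_ definition above) =====
theorem get_cluster_info_spec : Claim_equal_get_cluster_info := by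
  intro labels _
  unfold Spec_get_cluster_info
  simp only [get_cluster_info, get_cluster_info_alt]
  have hs : (PySem.List.sorted labels (fun x => x) false).Pairwise (· ≤ ·) :=
    PySem.List.sorted_pairwise labels (fun x => x)
  have hperm : (PySem.List.sorted labels (fun x => x) false).Perm labels :=
    PySem.List.sorted_perm labels (fun x => x) false
  have hU : PySem.List.sorted (PySem.Set.ofList labels) (fun x => x) false
      = pvKeys (PySem.List.sorted labels (fun x => x) false) := by
    apply List.Perm.eq_of_pairwise (le := fun a b => a ≤ b)
    · intro a b _ _ h1 h2; exact le_antisymm h1 h2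
    · exact PySem.List.sorted_pairwise _ _
    · exact (pvKeys_pairwise _ hs).imp (fun h => le_of_lt h)
    · rw [List.perm_ext_iff_of_nodup
        (((PySem.List.sorted_perm _ _ _).nodup_iff).mpr (PySem.Set.nodup_ofList labels))
        ((pvKeys_pairwise _ hs).imp (fun h => ne_of_lt h))]
      intro a
      rw [(PySem.List.sorted_perm _ _ _).mem_iff, PySem.Set.mem_ofList,
        pvKeys_mem _ hs, hperm.mem_iff]
  have hfold : ∀ (acc : List (List (String × Int))),
      (pvKeys (PySem.List.sorted labels (fun x => x) false)).foldl
        (fun acc label => if label == -1 then acc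
          else acc ++ [[("cluster_id", label), ("size", (PySem.List.count labels label : Int))]]) acc
      = acc ++ ((pvKeys (PySem.List.sorted labels (fun x => x) false)).filter
            (fun k => !(k == -1))).map
          (fun k => [("cluster_id", k), ("size", (PySem.List.count labels k : Int))]) := by
    intro acc
    rw [← PySem.List.foldl_append_if (fun k => !(k == -1))
      (fun k => [("cluster_id", k), ("size", (PySem.List.count labels k : Int))]) _ acc]
    apply PySem.List.foldl_congr_mem
    intro acc x _
    by_cases h : x = -1 <;> simp [h]
  rw [hU, hfold, pvRuns_eq _ hs, List.nil_append]
  congr 1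
  apply List.map_congr_left
  intro k _
  have : PySem.List.count labels k = List.count k (PySem.List.sorted labels (fun x => x) false) := by
    simp [PySem.List.count, hperm.count_eq k]
  rw [this]
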